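-- pv_equiv track=rewrite | github.com/fishefam/py-raoic | sin.py | find_missing_digit
-- ===== SOURCE A (Python) =====
-- from typing import List
--
-- EVEN_DIGIT_INDEXES = (1, 3, 5, 7)  # Position (2, 4, 6, 8) in SIN number
--
-- ODD_DIGIT_INDEXES = (0, 2, 4, 6)  # Position (1, 3, 5, 7) in SIN number
--
-- def sum_digits(digits: List[int | str], skip_index=-1) -> int:
--     '''
--     Sum all digits exept the last from a given list. If a digit is in
--     an even position of SIN number,double it and add its digits then continue the sum.
--
--         Parameters:
--             digits (List[str]): A list of digits
--             skip_index (int): The index of a digit to skip.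
--                               An index out of the list range means no digit is skipped
--
--         Returns:
--             digit_sum (int): The sum of SIN digits
--     '''
--
--     digit_sum: int = 0
--
--     for i, digit in enumerate(digits):
--         if i != skip_index and i in EVEN_DIGIT_INDEXES:
--             doubled: str = str(2 * digit)
--             if len(doubled) == 2:
--                 left: int = int(doubled[0:1])
--                 right: int = int(doubled[1])
--                 left_right = left + right
--                 digit_sum += left_right
--             if len(doubled) == 1:
--                 digit_sum += int(doubled)
--         if i != skip_index and i in ODD_DIGIT_INDEXES:
--             digit_sum += int(digit)
--
--     return digit_sum
--
-- def find_missing_digit(sin: str, index: int) -> int: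
--     '''
--     Find ONE missing digit in a given string of SIN number
--
--         Parameters:
--             sin (str): A string of SIN number
--             index (int): The index of the missing digit
--
--         Returns:
--             missing_digit (int): The missing digit or -1 if can't find any
--     '''
--
--     digits: List[int | str] = [int(x) if x.isdigit() else x for x in sin]
--     missing_digit: int = -1
--     digit_sum: int = 0
--
--     if index == 8:  # Find check digit
--         digit_sum = sum_digits(digits)
--         missing_digit = - digit_sum % 10
--
--     if index != 8:  # Find main digit
--         check_digit: int = int(digits[-1])
--         digit_sum = sum_digits(digits, index)
--
--         if index in ODD_DIGIT_INDEXES: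
--             missing_digit = (- check_digit - digit_sum) % 10
--         if index in EVEN_DIGIT_INDEXES:
--             doubled_missing_digit = (- check_digit - digit_sum) % 10
--
--             if doubled_missing_digit % 2 == 0:
--                 missing_digit = int(doubled_missing_digit / 2)
--             # This is the case where 2x is congruent to an odd number
--             if doubled_missing_digit % 2 != 0:
--                 missing_digit = int((doubled_missing_digit + 9) / 2)
--
--     return missing_digit
-- ===== SOURCE B (Python) =====
-- def luhn_add(i, d):
--     """Luhn contribution of digit d at position i (odd positions doubled with digit-sum)."""
--     return d if i % 2 == 0 else (2 * d if d < 5 else 2 * d - 9)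
--
-- def luhn_total(digits, index, candidate):
--     """Luhn checksum of positions 0..7 plus the check digit, with candidate at position index."""
--     total = candidate if index == 8 else int(digits[-1])
--     for i in range(8):
--         if i == index:
--             total += luhn_add(i, candidate)
--         elif i < len(digits):
--             total += luhn_add(i, int(digits[i]))
--     return total
--
-- def find_missing_digit(sin, index):
--     digits = [int(x) if x.isdigit() else x for x in sin]
--     valid = 0 <= index <= 8  # only these are positions of a 9-digit SIN
--     for candidate in range(10):
--         if luhn_total(digits, index, candidate) % 10 == 0:
--             return candidate if valid else -1
--     return -1
-- ===== Notes on version B (the rewrite author's own statement) =====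
-- stated objective: alternative
-- what changed: Replaces A's closed-form solving of the Luhn congruence (separate index==8 / odd / even branches with halving tricks) by a single 0..9 candidate search that substitutes the candidate and checks the checksum directly.
import Mathlib
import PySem

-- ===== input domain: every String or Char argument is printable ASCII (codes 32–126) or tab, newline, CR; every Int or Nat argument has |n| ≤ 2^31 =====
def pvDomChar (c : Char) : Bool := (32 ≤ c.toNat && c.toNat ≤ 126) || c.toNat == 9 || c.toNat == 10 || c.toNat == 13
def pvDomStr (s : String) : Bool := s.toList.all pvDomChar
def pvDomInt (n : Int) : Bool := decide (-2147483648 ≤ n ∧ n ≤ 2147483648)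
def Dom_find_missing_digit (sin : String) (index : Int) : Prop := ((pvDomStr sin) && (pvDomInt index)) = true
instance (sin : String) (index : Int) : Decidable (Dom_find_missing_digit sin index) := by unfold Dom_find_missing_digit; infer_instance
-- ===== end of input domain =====

-- B replaces A's closed-form solving of the Luhn congruence (three branches with a halving trick)
-- by a direct 0..9 candidate search checking the checksum; equal on all inputs where A returns (Pre_).

-- ===== PORT A =====
-- int(x) for a single digit character x
def pvDigitVal (c : Char) : Int := (c.toNat : Int) - 48

-- the comprehension element: int(x) if x.isdigit() else x  (1-char Python str as List Char)
def pvConv (x : Char) : Int ⊕ List Char :=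
  if PySem.Chars.isdigit x then Sum.inl (pvDigitVal x) else Sum.inr [x]

-- int(digit) on an int|str element; ofChars? = none (ValueError) is excluded by Pre_
def pvInt (x : Int ⊕ List Char) : Int :=
  match x with
  | Sum.inl n => n
  | Sum.inr s => (PySem.Int.ofChars? s).getD 0

-- the doubled-digit block of sum_digits: doubled = str(2*digit); add its one or two digits
-- (2 * str is Python string repetition, str() of a str is itself; int(...) ValueError excluded by Pre_)
def pvDoubleVal (digit : Int ⊕ List Char) : Int :=
  let doubled : List Char :=
    match digit with
    | Sum.inl n => PySem.Int.toChars (2 * n)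
    | Sum.inr s => s ++ s
  (if doubled.length = 2 then
      (PySem.Int.ofChars? (doubled.take 1)).getD 0 + (PySem.Int.ofChars? ((doubled.drop 1).take 1)).getD 0
    else 0)
  + (if doubled.length = 1 then (PySem.Int.ofChars? doubled).getD 0 else 0)

def sum_digits (digits : List (Int ⊕ List Char)) (skip_index : Int) : Int :=
  (PySem.List.enumerate digits).foldl
    (fun digit_sum p =>
      let ds1 := if p.1 ≠ skip_index ∧ p.1 ∈ ([1, 3, 5, 7] : List Int) then digit_sum + pvDoubleVal p.2 else digit_sum
      if p.1 ≠ skip_index ∧ p.1 ∈ ([0, 2, 4, 6] : List Int) then ds1 + pvInt p.2 else ds1)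
    0

def find_missing_digit (sin : String) (index : Int) : Int :=
  let digits := sin.toList.map pvConv
  if index = 8 then
    PySem.Int.mod (- sum_digits digits (-1)) 10
  else
    let check := pvInt ((PySem.List.pyGet? digits (-1)).getD (Sum.inl 0))  -- digits[-1]; IndexError excluded by Pre_
    let digit_sum := sum_digits digits index
    if index ∈ ([0, 2, 4, 6] : List Int) then
      PySem.Int.mod (- check - digit_sum) 10
    else if index ∈ ([1, 3, 5, 7] : List Int) then
      let dm := PySem.Int.mod (- check - digit_sum) 10
      if PySem.Int.mod dm 2 = 0 then PySem.Int.floordiv dm 2  -- int(dm / 2): exact, dm even and nonnegative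
      else PySem.Int.floordiv (dm + 9) 2                       -- int((dm + 9) / 2): exact, dm + 9 even
    else -1

-- ===== PORT B =====
def luhn_add (i d : Int) : Int :=
  if PySem.Int.mod i 2 = 0 then d else if d < 5 then 2 * d else 2 * d - 9

def luhn_total (digits : List (Int ⊕ List Char)) (index candidate : Int) : Int :=
  (PySem.List.pyRange 0 8 1).foldl
    (fun t i =>
      if i = index then t + luhn_add i candidate
      else if i < (digits.length : Int) then t + luhn_add i (pvInt (PySem.List.pyGetD digits i (Sum.inl 0)))
      else t)
    (if index = 8 then candidate else pvInt ((PySem.List.pyGet? digits (-1)).getD (Sum.inl 0)))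

def find_missing_digit_alt (sin : String) (index : Int) : Int :=
  let digits := sin.toList.map pvConv
  let valid := 0 ≤ index ∧ index ≤ 8
  match (PySem.List.pyRange 0 10 1).find?
      (fun candidate => PySem.Int.mod (luhn_total digits index candidate) 10 == 0) with
  | some c => if valid then c else -1
  | none => -1

-- ===== PRECONDITION & SPEC =====
-- Pre_ excludes exactly the inputs where A raises: when index != 8 an empty string or a
-- non-digit last character (int(digits[-1]) raises), and any non-digit character among
-- positions 0..7 other than position index (int() on it raises ValueError inside sum_digits).
def Pre_find_missing_digit (sin : String) (index : Int) : Prop :=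
  (index = 8 ∨ (sin.toList ≠ [] ∧ PySem.Chars.isdigit (sin.toList.getLast?.getD '0') = true)) ∧
  ∀ i ∈ List.range (min 8 sin.toList.length), (i : Int) ≠ index →
    PySem.Chars.isdigit (sin.toList.getD i '0') = true
instance (sin : String) (index : Int) : Decidable (Pre_find_missing_digit sin index) := by
  unfold Pre_find_missing_digit; infer_instance

def pvWitness_find_missing_digit : String × Int := ("123456789", 3)

def Spec_find_missing_digit (sin : String) (index : Int) (out : Int) : Prop := out = find_missing_digit_alt sin index
instance (sin : String) (index : Int) (out : Int) : Decidable (Spec_find_missing_digit sin index out) := by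
  unfold Spec_find_missing_digit; infer_instance

-- ===== CLAIM (what is proved, stated in full; the proofs are below) =====
def Claim_equal_find_missing_digit : Prop := ∀ (sin : String) (index : Int), Dom_find_missing_digit sin index → Pre_find_missing_digit sin index → Spec_find_missing_digit sin index (find_missing_digit sin index)

-- ===== LEMMAS AND PROOFS =====

-- digit characters have value 0..9
theorem pvDigit_bounds (c : Char) (h : PySem.Chars.isdigit c = true) :
    0 ≤ pvDigitVal c ∧ pvDigitVal c ≤ 9 := by
  unfold PySem.Chars.isdigit at h
  rw [Bool.and_eq_true, decide_eq_true_iff, decide_eq_true_iff, Char.le_def, Char.le_def] at h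
  have h1 := h.1; have h2 := h.2
  simp only [UInt32.le_iff_toNat_le] at h1 h2
  have e0 : ('0' : Char).val.toNat = 48 := by decide
  have e9 : ('9' : Char).val.toNat = 57 := by decide
  have ec : c.toNat = c.val.toNat := rfl
  unfold pvDigitVal; omega

-- A's doubled-digit block computes the Luhn contribution for a digit 0..9
theorem pvDoubleVal_inl (n : Int) (h0 : 0 ≤ n) (h9 : n ≤ 9) :
    pvDoubleVal (Sum.inl n) = (if n < 5 then 2 * n else 2 * n - 9) := by
  interval_cases n <;> decide

-- the canonical per-position contribution both ports are reduced to
def pvG (cs : List Char) (skip j : Int) : Int :=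
  if j ≠ skip ∧ 0 ≤ j ∧ j < (cs.length : Int) ∧ j < 8 then
    luhn_add j (pvDigitVal (cs.getD j.toNat '0'))
  else 0

def pvS (cs : List Char) (skip : Int) : Int := ((PySem.List.pyRange 0 8 1).map (pvG cs skip)).sum

-- the sum of pvG over positions 0..len-1 equals its sum over 0..7 (terms outside are 0)
theorem pvS_ext (cs : List Char) (skip : Int) :
    ((PySem.List.pyRange 0 (cs.length : Int) 1).map (pvG cs skip)).sum = pvS cs skip := by
  unfold pvS
  by_cases h : (cs.length : Int) ≤ 8
  · rw [PySem.List.pyRange_one_append 0 (cs.length : Int) 8 (by omega) (by omega), List.map_append,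
      List.sum_append]
    have hz : ((PySem.List.pyRange (cs.length : Int) 8 1).map (pvG cs skip)).sum = 0 := by
      apply List.sum_eq_zero
      intro x hx
      obtain ⟨j, hj, rfl⟩ := List.mem_map.mp hx
      rw [PySem.List.mem_pyRange_one] at hj
      simp only [pvG]
      rw [if_neg (by omega)]
    omega
  · rw [PySem.List.pyRange_one_append 0 8 (cs.length : Int) (by omega) (by omega), List.map_append,
      List.sum_append]
    have hz : ((PySem.List.pyRange 8 (cs.length : Int) 1).map (pvG cs skip)).sum = 0 := by
      apply List.sum_eq_zero
      intro x hx
      obtain ⟨j, hj, rfl⟩ := List.mem_map.mp hx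
      rw [PySem.List.mem_pyRange_one] at hj
      simp only [pvG]
      rw [if_neg (by omega)]
    omega

theorem pvSumA (cs : List Char) (skip : Int)
    (hd : ∀ i ∈ List.range (min 8 cs.length), (i : Int) ≠ skip →
      PySem.Chars.isdigit (cs.getD i '0') = true) :
    sum_digits (cs.map pvConv) skip = pvS cs skip := by
  unfold sum_digits
  rw [PySem.List.enumerate_eq_map_pyRange (cs.map pvConv) (Sum.inl 0)]
  rw [List.foldl_map]
  rw [PySem.List.foldl_congr_mem _ _
    (fun (ds : Int) (j : Int) =>
      ds + ((if j ≠ skip ∧ j ∈ ([1, 3, 5, 7] : List Int) then pvDoubleVal (PySem.List.pyGetD (cs.map pvConv) j (Sum.inl 0)) else 0)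
        + (if j ≠ skip ∧ j ∈ ([0, 2, 4, 6] : List Int) then pvInt (PySem.List.pyGetD (cs.map pvConv) j (Sum.inl 0)) else 0))) _
    (by intro acc x hx; dsimp only; split_ifs <;> ring)]
  rw [PySem.List.foldl_add]
  rw [show (PySem.List.len (cs.map pvConv)) = (cs.length : Int) by simp [PySem.List.len]]
  rw [List.map_congr_left (g := pvG cs skip) ?_, pvS_ext]
  · omega
  · intro j hj
    rw [PySem.List.mem_pyRange_one] at hj
    by_cases hj8 : j < 8
    swap
    · have h1 : ¬ (j ≠ skip ∧ j ∈ ([1, 3, 5, 7] : List Int)) := by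
        rintro ⟨-, hm⟩; simp at hm; omega
      have h2 : ¬ (j ≠ skip ∧ j ∈ ([0, 2, 4, 6] : List Int)) := by
        rintro ⟨-, hm⟩; simp at hm; omega
      rw [if_neg h1, if_neg h2]
      unfold pvG
      rw [if_neg (by omega)]
      omega
    by_cases hjs : j = skip
    · subst hjs
      rw [if_neg (by simp), if_neg (by simp)]
      unfold pvG
      rw [if_neg (by simp)]
      omega
    -- j in [0,8), j ≠ skip, j < len: a digit position
    have hlen : j.toNat < cs.length := by omega
    have hdig : PySem.Chars.isdigit cs[j.toNat] = true := by
      have := hd j.toNat (by rw [List.mem_range]; omega)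
        (by rw [show ((j.toNat : Int)) = j by omega]; exact hjs)
      rwa [List.getD_eq_getElem cs '0' hlen] at this
    have hget : PySem.List.pyGetD (cs.map pvConv) j (Sum.inl 0) = Sum.inl (pvDigitVal cs[j.toNat]) := by
      rw [PySem.List.pyGetD_eq_getElem _ _ (by omega) (by simpa using hj.2)]
      rw [List.getElem_map]
      simp [pvConv, hdig]
    obtain ⟨hb0, hb9⟩ := pvDigit_bounds _ hdig
    rw [hget]
    have hpvg : pvG cs skip j = luhn_add j (pvDigitVal cs[j.toNat]) := by
      unfold pvG
      rw [if_pos (And.intro hjs (And.intro (by omega) (And.intro hj.2 hj8))),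
        List.getD_eq_getElem cs '0' hlen]
    rw [hpvg]
    have hj07 : j = 0 ∨ j = 1 ∨ j = 2 ∨ j = 3 ∨ j = 4 ∨ j = 5 ∨ j = 6 ∨ j = 7 := by omega
    rcases hj07 with rfl | rfl | rfl | rfl | rfl | rfl | rfl | rfl
    · rw [if_neg (by simp), if_pos ⟨hjs, by simp⟩]; simp [luhn_add, pvInt]
    · rw [if_pos ⟨hjs, by simp⟩, if_neg (by simp), pvDoubleVal_inl _ hb0 hb9]
      simp [luhn_add]
    · rw [if_neg (by simp), if_pos ⟨hjs, by simp⟩]; simp [luhn_add, pvInt]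
    · rw [if_pos ⟨hjs, by simp⟩, if_neg (by simp), pvDoubleVal_inl _ hb0 hb9]
      simp [luhn_add]
    · rw [if_neg (by simp), if_pos ⟨hjs, by simp⟩]; simp [luhn_add, pvInt]
    · rw [if_pos ⟨hjs, by simp⟩, if_neg (by simp), pvDoubleVal_inl _ hb0 hb9]
      simp [luhn_add]
    · rw [if_neg (by simp), if_pos ⟨hjs, by simp⟩]; simp [luhn_add, pvInt]
    · rw [if_pos ⟨hjs, by simp⟩, if_neg (by simp), pvDoubleVal_inl _ hb0 hb9]
      simp [luhn_add]

theorem pvE (index c : Int) (h0 : 0 ≤ index) (h8 : index ≤ 8) :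
    ((PySem.List.pyRange 0 8 1).map (fun i => if i = index then luhn_add index c else 0)).sum
      = (if index < 8 then luhn_add index c else 0) := by
  interval_cases index <;>
    simp [show PySem.List.pyRange 0 8 1 = [0, 1, 2, 3, 4, 5, 6, 7] from by decide]

theorem pvTotal (cs : List Char) (index : Int) (h0 : 0 ≤ index) (h8 : index ≤ 8)
    (hd : ∀ i ∈ List.range (min 8 cs.length), (i : Int) ≠ index →
      PySem.Chars.isdigit (cs.getD i '0') = true)
    (c : Int) :
    luhn_total (cs.map pvConv) index c
    = (if index = 8 then c else pvInt ((PySem.List.pyGet? (cs.map pvConv) (-1)).getD (Sum.inl 0)))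
      + pvS cs index + (if index < 8 then luhn_add index c else 0) := by
  unfold luhn_total
  rw [PySem.List.foldl_congr_mem _ _
    (fun (t : Int) (i : Int) =>
      t + (if i = index then luhn_add i c
        else if i < ((cs.map pvConv).length : Int) then luhn_add i (pvInt (PySem.List.pyGetD (cs.map pvConv) i (Sum.inl 0)))
        else 0)) _
    (by intro acc x hx; dsimp only; split_ifs <;> ring)]
  rw [PySem.List.foldl_add]
  rw [List.map_congr_left
    (g := fun i => pvG cs index i + (if i = index then luhn_add index c else 0)) ?_]
  · rw [PySem.List.sum_map_add_int, pvE index c h0 h8]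
    unfold pvS
    ring
  · intro j hj
    rw [PySem.List.mem_pyRange_one] at hj
    dsimp only
    by_cases hji : j = index
    · subst hji
      rw [if_pos rfl, if_pos rfl]
      unfold pvG
      rw [if_neg (by simp)]
      ring
    rw [if_neg hji, if_neg hji]
    by_cases hil : j < (cs.length : Int)
    swap
    · rw [if_neg (by simpa using hil)]
      unfold pvG
      rw [if_neg (by omega)]
      omega
    have hlen : j.toNat < cs.length := by omega
    have hdig : PySem.Chars.isdigit cs[j.toNat] = true := by
      have := hd j.toNat (by rw [List.mem_range]; omega)
        (by rw [show ((j.toNat : Int)) = j by omega]; exact hji)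
      rwa [List.getD_eq_getElem cs '0' hlen] at this
    have hget : PySem.List.pyGetD (cs.map pvConv) j (Sum.inl 0) = Sum.inl (pvDigitVal cs[j.toNat]) := by
      rw [PySem.List.pyGetD_eq_getElem _ _ (by omega) (by simpa using hil)]
      rw [List.getElem_map]
      simp [pvConv, hdig]
    rw [if_pos (by simpa using hil), hget]
    unfold pvG
    rw [if_pos (And.intro hji (And.intro (by omega) (And.intro hil hj.2))),
      List.getD_eq_getElem cs '0' hlen]
    simp [pvInt]

-- first element of range(a, 10) satisfying p
theorem pvFind (p : Int → Bool) (m : Int) (hm10 : m < 10) (hpm : p m = true) :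
    ∀ (k : Nat) (a : Int), m = a + k → (∀ c, a ≤ c → c < m → p c = false) →
      (PySem.List.pyRange a 10 1).find? p = some m := by
  intro k
  induction k with
  | zero =>
    intro a ha _
    rw [PySem.List.pyRange_one_cons (by omega)]
    rw [List.find?_cons_of_pos (by simpa [show a = m by omega] using hpm)]
    exact congrArg some (by omega)
  | succ k ih =>
    intro a ha hlt
    rw [PySem.List.pyRange_one_cons (by omega)]
    rw [List.find?_cons_of_neg (by simp [hlt a (by omega) (by omega)])]
    exact ih (a + 1) (by omega) (fun c hc1 hc2 => hlt c (by omega) hc2)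

theorem pvCase8 (S : Int) (p : Int → Bool)
    (hp : ∀ c, p c = (PySem.Int.mod (c + S) 10 == 0)) :
    (PySem.List.pyRange 0 10 1).find? p = some (PySem.Int.mod (-S) 10) := by
  have hmE : PySem.Int.mod (-S) 10 = (-S) % 10 := PySem.Int.mod_eq_emod_of_pos (by norm_num)
  apply pvFind p _ (by omega) ?_ (PySem.Int.mod (-S) 10).toNat 0 (by omega) ?_
  · rw [hp]
    simp only [beq_iff_eq]
    rw [PySem.Int.mod_eq_emod_of_pos (by norm_num)]
    omega
  · intro c hc0 hcm
    rw [hp]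
    simp only [beq_eq_false_iff_ne, ne_eq]
    rw [PySem.Int.mod_eq_emod_of_pos (by norm_num)]
    omega

theorem pvCaseEven (C S : Int) (p : Int → Bool)
    (hp : ∀ c, p c = (PySem.Int.mod (C + S + c) 10 == 0)) :
    (PySem.List.pyRange 0 10 1).find? p = some (PySem.Int.mod (-C - S) 10) := by
  have hmE : PySem.Int.mod (-C - S) 10 = (-C - S) % 10 := PySem.Int.mod_eq_emod_of_pos (by norm_num)
  apply pvFind p _ (by omega) ?_ (PySem.Int.mod (-C - S) 10).toNat 0 (by omega) ?_
  · rw [hp]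
    simp only [beq_iff_eq]
    rw [PySem.Int.mod_eq_emod_of_pos (by norm_num)]
    omega
  · intro c hc0 hcm
    rw [hp]
    simp only [beq_eq_false_iff_ne, ne_eq]
    rw [PySem.Int.mod_eq_emod_of_pos (by norm_num)]
    omega

theorem pvCaseOdd (C S : Int) (p : Int → Bool)
    (hp : ∀ c, p c = (PySem.Int.mod (C + S + (if c < 5 then 2 * c else 2 * c - 9)) 10 == 0)) :
    (PySem.List.pyRange 0 10 1).find? p
      = some (if PySem.Int.mod (PySem.Int.mod (-C - S) 10) 2 = 0
          then PySem.Int.floordiv (PySem.Int.mod (-C - S) 10) 2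
          else PySem.Int.floordiv (PySem.Int.mod (-C - S) 10 + 9) 2) := by
  have hdE : PySem.Int.mod (-C - S) 10 = (-C - S) % 10 := PySem.Int.mod_eq_emod_of_pos (by norm_num)
  have hparE : PySem.Int.mod (PySem.Int.mod (-C - S) 10) 2 = ((-C - S) % 10) % 2 := by
    rw [hdE, PySem.Int.mod_eq_emod_of_pos (by norm_num)]
  have hd1 : PySem.Int.floordiv (PySem.Int.mod (-C - S) 10) 2 = ((-C - S) % 10) / 2 := by
    rw [hdE, PySem.Int.floordiv_eq_ediv_of_pos (by norm_num)]
  have hd2 : PySem.Int.floordiv (PySem.Int.mod (-C - S) 10 + 9) 2 = ((-C - S) % 10 + 9) / 2 := by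
    rw [hdE, PySem.Int.floordiv_eq_ediv_of_pos (by norm_num)]
  set m := (if PySem.Int.mod (PySem.Int.mod (-C - S) 10) 2 = 0
      then PySem.Int.floordiv (PySem.Int.mod (-C - S) 10) 2
      else PySem.Int.floordiv (PySem.Int.mod (-C - S) 10 + 9) 2) with hmdef
  have hmval : m = (if ((-C - S) % 10) % 2 = 0 then ((-C - S) % 10) / 2 else ((-C - S) % 10 + 9) / 2) := by
    rw [hmdef, hparE, hd1, hd2]
  have hmb : 0 ≤ m ∧ m < 10 := by
    rw [hmval]; split_ifs <;> omega
  apply pvFind p m (by omega) ?_ m.toNat 0 (by omega) ?_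
  · rw [hp]
    simp only [beq_iff_eq]
    rw [PySem.Int.mod_eq_emod_of_pos (by norm_num)]
    rw [hmval]
    split_ifs <;> omega
  · intro c hc0 hcm
    rw [hp]
    simp only [beq_eq_false_iff_ne, ne_eq]
    rw [PySem.Int.mod_eq_emod_of_pos (by norm_num)]
    rw [hmval] at hcm
    split_ifs at hcm <;> by_cases hc5 : c < 5 <;> simp only [hc5, if_pos, if_neg, not_false_iff] <;> omega

-- ===== VERDICT (by name: the statement is the Claim_ definition above) =====
theorem find_missing_digit_spec : Claim_equal_find_missing_digit := by
  intro sin index hDom hPre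
  unfold Spec_find_missing_digit
  obtain ⟨hchk, hd⟩ := hPre
  simp only [find_missing_digit, find_missing_digit_alt]
  by_cases h8 : index = 8
  · subst h8
    rw [if_pos rfl]
    rw [pvSumA _ _ (fun i hi _ => hd i hi (by rw [List.mem_range] at hi; omega))]
    have hS : pvS sin.toList (-1) = pvS sin.toList 8 := by
      unfold pvS
      apply congrArg
      apply List.map_congr_left
      intro j hj
      rw [PySem.List.mem_pyRange_one] at hj
      unfold pvG
      apply if_congr _ rfl rfl
      constructor
      · rintro ⟨h1, h2, h3, h4⟩; exact ⟨by omega, h2, h3, h4⟩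
      · rintro ⟨h1, h2, h3, h4⟩; exact ⟨by omega, h2, h3, h4⟩
    have hTot : ∀ c, luhn_total (sin.toList.map pvConv) 8 c = c + pvS sin.toList 8 := by
      intro c
      rw [pvTotal sin.toList 8 (by omega) (by omega)
        (fun i hi _ => hd i hi (by rw [List.mem_range] at hi; omega)) c]
      rw [if_pos rfl, if_neg (by omega)]
      ring
    rw [pvCase8 (pvS sin.toList 8)
      (fun candidate => PySem.Int.mod (luhn_total (sin.toList.map pvConv) 8 candidate) 10 == 0)
      (fun c => by simp only [hTot])]
    rw [hS]
    dsimp only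
    rw [if_pos (by omega)]
  by_cases hout : index < 0 ∨ 8 < index
  · rw [if_neg h8]
    rw [if_neg (by intro hm; simp at hm; omega), if_neg (by intro hm; simp at hm; omega)]
    cases ((PySem.List.pyRange 0 10 1).find?
        (fun candidate => PySem.Int.mod (luhn_total (sin.toList.map pvConv) index candidate) 10 == 0)) with
    | none => rfl
    | some c => dsimp only; rw [if_neg (by omega)]
  · rw [if_neg h8]
    have hlo : 0 ≤ index := by omega
    have hhi : index < 8 := by omega
    simp only [if_pos (show (0:Int) ≤ index ∧ index ≤ 8 from ⟨hlo, by omega⟩)]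
    rw [pvSumA _ _ hd]
    have hTot : ∀ c, luhn_total (sin.toList.map pvConv) index c
        = pvInt ((PySem.List.pyGet? (sin.toList.map pvConv) (-1)).getD (Sum.inl 0))
          + pvS sin.toList index + luhn_add index c := by
      intro c
      rw [pvTotal sin.toList index (by omega) (by omega) hd c]
      rw [if_neg h8, if_pos (by omega)]
    interval_cases index
    · rw [if_pos (by decide)]
      rw [pvCaseEven _ (pvS sin.toList 0) _
        (fun c => by simp only [hTot]; rw [show luhn_add 0 c = c from by simp [luhn_add]])]
    · rw [if_neg (by decide), if_pos (by decide)]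
      rw [pvCaseOdd _ (pvS sin.toList 1) _
        (fun c => by simp only [hTot]; rw [show luhn_add 1 c = (if c < 5 then 2 * c else 2 * c - 9) from by
          simp [luhn_add]])]
    · rw [if_pos (by decide)]
      rw [pvCaseEven _ (pvS sin.toList 2) _
        (fun c => by simp only [hTot]; rw [show luhn_add 2 c = c from by
          simp [luhn_add]])]
    · rw [if_neg (by decide), if_pos (by decide)]
      rw [pvCaseOdd _ (pvS sin.toList 3) _
        (fun c => by simp only [hTot]; rw [show luhn_add 3 c = (if c < 5 then 2 * c else 2 * c - 9) from by
          simp [luhn_add]])]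
    · rw [if_pos (by decide)]
      rw [pvCaseEven _ (pvS sin.toList 4) _
        (fun c => by simp only [hTot]; rw [show luhn_add 4 c = c from by
          simp [luhn_add]])]
    · rw [if_neg (by decide), if_pos (by decide)]
      rw [pvCaseOdd _ (pvS sin.toList 5) _
        (fun c => by simp only [hTot]; rw [show luhn_add 5 c = (if c < 5 then 2 * c else 2 * c - 9) from by
          simp [luhn_add]])]
    · rw [if_pos (by decide)]
      rw [pvCaseEven _ (pvS sin.toList 6) _
        (fun c => by simp only [hTot]; rw [show luhn_add 6 c = c from by
          simp [luhn_add]])]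
    · rw [if_neg (by decide), if_pos (by decide)]
      rw [pvCaseOdd _ (pvS sin.toList 7) _
        (fun c => by simp only [hTot]; rw [show luhn_add 7 c = (if c < 5 then 2 * c else 2 * c - 9) from by
          simp [luhn_add]])]
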